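-- pv_equiv track=rewrite | github.com/sowmyasunkara-knsass/codemind-python | solve.py | solve
-- ===== SOURCE A (Python) =====
-- from collections import Counter
--
-- def solve(N):
--     a = Counter(N)
--     c = []
--     b = max(a.values())
--     for i in a:
--         if a[i]==b:
--             c.append(i)
--     return max(c)
-- ===== SOURCE B (Python) =====
-- def solve(N):
--     s = sorted(N)
--     best_val = s[0]
--     best_cnt = 0
--     cur = 0
--     prev = None
--     for x in s:
--         cur = cur + 1 if prev == x else 1
--         prev = x
--         if cur >= best_cnt:
--             best_cnt = cur
--             best_val = x
--     return best_val
-- ===== Notes on version B (the rewrite author's own statement) =====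
-- stated objective: alternative
-- what changed: B abandons the Counter dictionary entirely: it sorts the list and makes one run-length scan over the sorted list, keeping a running (best_count, best_value) that is overwritten on >= so the last (largest) run among the most frequent wins, instead of A's hash count / max-frequency / filter / max pipeline.
import Mathlib
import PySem

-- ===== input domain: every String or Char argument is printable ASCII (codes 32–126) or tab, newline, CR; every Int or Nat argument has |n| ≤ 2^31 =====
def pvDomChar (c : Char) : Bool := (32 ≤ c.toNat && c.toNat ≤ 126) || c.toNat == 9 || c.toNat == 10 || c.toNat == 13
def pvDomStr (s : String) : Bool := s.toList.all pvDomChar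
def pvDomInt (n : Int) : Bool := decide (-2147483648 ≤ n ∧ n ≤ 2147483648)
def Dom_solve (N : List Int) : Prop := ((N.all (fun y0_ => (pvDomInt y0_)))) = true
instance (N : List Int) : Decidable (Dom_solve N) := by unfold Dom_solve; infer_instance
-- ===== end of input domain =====

-- B drops A's Counter/max-frequency/filter/max pipeline: it sorts the list and makes one
-- run-length scan keeping a running (best_count, best_value); objective: alternative.

-- ===== PORT A =====
def solve (N : List Int) : Int :=
  let a := PySem.Dict.counter N
  match PySem.List.max? a.values (fun v => v) with
  | none => 0  -- unreachable under Pre_solve: max(a.values()) raises ValueError only for N = []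
  | some b =>
    let c := a.keys.foldl (fun c i => if a.getD i 0 = b then c ++ [i] else c) ([] : List Int)
    match PySem.List.max? c (fun v => v) with
    | none => 0  -- unreachable: c is nonempty whenever a is
    | some m => m

-- ===== PORT B =====
-- one loop iteration of Source B: state = (prev, cur, best_cnt, best_val)
def bstep (st : Option Int × Int × Int × Int) (x : Int) : Option Int × Int × Int × Int :=
  let cur := if st.1 = some x then st.2.1 + 1 else 1
  if st.2.2.1 ≤ cur then (some x, cur, cur, x) else (some x, cur, st.2.2.1, st.2.2.2)

def solve_alt (N : List Int) : Int :=
  let s := PySem.List.sorted N (fun x => x) false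
  match PySem.List.pyGet? s 0 with
  | none => 0  -- unreachable under Pre_solve: s[0] raises IndexError only for N = []
  | some h0 => (s.foldl bstep (none, 0, 0, h0)).2.2.2

-- ===== PRECONDITION & SPEC =====
-- On the empty list A raises ValueError (max of empty values) and B raises IndexError; Pre_ excludes it.
def Pre_solve (N : List Int) : Prop := N ≠ []
instance (N : List Int) : Decidable (Pre_solve N) := by unfold Pre_solve; infer_instance
def pvWitness_solve : List Int := [1, 2, 2, 3]

def Spec_solve (N : List Int) (out : Int) : Prop := out = solve_alt N
instance (N : List Int) (out : Int) : Decidable (Spec_solve N out) := by unfold Spec_solve; infer_instance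

-- ===== CLAIM =====
def Claim_equal_solve : Prop := ∀ (N : List Int), Dom_solve N → Pre_solve N → Spec_solve N (solve N)

-- ===== LEMMAS AND PROOFS =====

-- the characterisation both programs realise: the largest element of maximal multiplicity
def IsBest (N : List Int) (m : Int) : Prop :=
  m ∈ N ∧ (∀ y ∈ N, N.count y ≤ N.count m) ∧ (∀ y ∈ N, N.count y = N.count m → y ≤ m)

theorem isBest_unique {N : List Int} {m₁ m₂ : Int} (h₁ : IsBest N m₁) (h₂ : IsBest N m₂) :
    m₁ = m₂ := by
  obtain ⟨hm₁, hc₁, ht₁⟩ := h₁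
  obtain ⟨hm₂, hc₂, ht₂⟩ := h₂
  have e : N.count m₁ = N.count m₂ :=
    le_antisymm (hc₂ m₁ hm₁) (hc₁ m₂ hm₂)
  exact le_antisymm (ht₂ m₁ hm₁ e) (ht₁ m₂ hm₂ e.symm)

theorem isBest_of_perm {s N : List Int} {m : Int} (hp : s.Perm N) (h : IsBest s m) :
    IsBest N m := by
  obtain ⟨hm, hc, ht⟩ := h
  refine ⟨hp.mem_iff.mp hm, ?_, ?_⟩
  · intro y hy
    have := hc y (hp.mem_iff.mpr hy)
    simpa [hp.count_eq] using this
  · intro y hy he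
    exact ht y (hp.mem_iff.mpr hy) (by simpa [hp.count_eq] using he)

-- the fold invariant of B's scan over a sorted prefix p
def BInv (p : List Int) (st : Option Int × Int × Int × Int) : Prop :=
  ∃ l, st.1 = some l ∧ l ∈ p ∧ (∀ y ∈ p, y ≤ l) ∧ st.2.1 = (p.count l : Int)
    ∧ st.2.2.2 ∈ p ∧ st.2.2.1 = (p.count st.2.2.2 : Int)
    ∧ (∀ y ∈ p, (p.count y : Int) ≤ st.2.2.1)
    ∧ (∀ y ∈ p, (p.count y : Int) = st.2.2.1 → y ≤ st.2.2.2)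

theorem bstep_inv {p : List Int} {st : Option Int × Int × Int × Int} {x : Int}
    (hinv : BInv p st) (hge : ∀ y ∈ p, y ≤ x) : BInv (p ++ [x]) (bstep st x) := by
  obtain ⟨l, hprev, hl, hlmax, hcur, hbv, hbc, hmax, htie⟩ := hinv
  have hcnt : ∀ y : Int, (p ++ [x]).count y = p.count y + if y = x then 1 else 0 := by
    intro y
    rw [List.count_append]
    by_cases h : y = x
    · subst h; simp
    · simp [List.count_singleton', h]
      exact fun e => h e.symm
  have hother : ∀ y : Int, y ≠ x → (p ++ [x]).count y = p.count y := by
    intro y hy; rw [hcnt y, if_neg hy]; omega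
  have hmemp : ∀ y ∈ p ++ [x], y ≠ x → y ∈ p := by
    intro y hy hyx
    rcases List.mem_append.mp hy with h | h
    · exact h
    · simp at h; exact absurd h hyx
  unfold bstep
  set c := (if st.1 = some x then st.2.1 + 1 else 1) with hc
  have hcx : c = ((p ++ [x]).count x : Int) := by
    rw [hcnt x, if_pos rfl]
    by_cases hx : st.1 = some x
    · have hxl : l = x := by rw [hx] at hprev; exact (Option.some.inj hprev).symm
      rw [hc, if_pos hx, hcur, hxl]; push_cast; ring
    · have hxnotp : x ∉ p := by
        intro hxp
        have hxe : x = l := le_antisymm (hlmax x hxp) (hge l hl)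
        exact hx (by rw [hprev, hxe])
      rw [hc, if_neg hx, List.count_eq_zero_of_not_mem hxnotp]
      simp
  have hmaxnew : ∀ y ∈ p ++ [x], y ≤ x := by
    intro y hy
    by_cases hyx : y = x
    · exact le_of_eq hyx
    · exact hge y (hmemp y hy hyx)
  by_cases hcmp : st.2.2.1 ≤ c
  · rw [if_pos hcmp]
    refine ⟨x, rfl, List.mem_append_right _ (by simp), hmaxnew, hcx,
      List.mem_append_right _ (by simp), hcx, ?_, fun y hy _ => hmaxnew y hy⟩
    intro y hy
    show ((p ++ [x]).count y : Int) ≤ c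
    by_cases hyx : y = x
    · rw [hyx, ← hcx]
    · 
      rw [hother y hyx]
      have := hmax y (hmemp y hy hyx)
      omega
  · rw [if_neg hcmp]
    have hbvx : st.2.2.2 ≠ x := by
      intro he
      have h1 : ((p ++ [x]).count x : Int) = (p.count x : Int) + 1 := by
        rw [hcnt x, if_pos rfl]; push_cast; ring
      rw [hbc, he] at hcmp
      omega
    refine ⟨x, rfl, List.mem_append_right _ (by simp), hmaxnew, hcx,
      List.mem_append_left _ hbv, ?_, ?_, ?_⟩
    · show st.2.2.1 = ((p ++ [x]).count st.2.2.2 : Int)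
      rw [hother _ hbvx]; exact hbc
    · intro y hy
      show ((p ++ [x]).count y : Int) ≤ st.2.2.1
      by_cases hyx : y = x
      · rw [hyx, ← hcx]; omega
      · rw [hother y hyx]
        exact hmax y (hmemp y hy hyx)
    · intro y hy he
      dsimp only at he ⊢
      by_cases hyx : y = x
      · rw [hyx, ← hcx] at he
        omega
      · rw [show ((p ++ [x]).count y : Int) = (p.count y : Int) from by rw [hother y hyx]] at he
        exact htie y (hmemp y hy hyx) he

theorem bfold_inv : ∀ (rest p : List Int) (st : Option Int × Int × Int × Int),
    (p ++ rest).Pairwise (· ≤ ·) → BInv p st → BInv (p ++ rest) (rest.foldl bstep st) := by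
  intro rest
  induction rest with
  | nil => intro p st _ h; simpa using h
  | cons x rest' ih =>
      intro p st hsort hinv
      have hge : ∀ y ∈ p, y ≤ x := by
        rw [List.pairwise_append] at hsort
        exact fun y hy => hsort.2.2 y hy x (by simp)
      have hsort' : ((p ++ [x]) ++ rest').Pairwise (· ≤ ·) := by
        simpa [List.append_assoc] using hsort
      have := ih (p ++ [x]) (bstep st x) hsort' (bstep_inv hinv hge)
      simpa [List.append_assoc] using this

-- B's port returns the IsBest element
theorem solve_alt_isBest {N : List Int} (h : N ≠ []) : IsBest N (solve_alt N) := by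
  unfold solve_alt
  simp only []
  set s := PySem.List.sorted N (fun x => x) false with hs
  have hperm : s.Perm N := PySem.List.sorted_perm N _ _
  obtain ⟨h0, t, hst⟩ : ∃ h0 t, s = h0 :: t := by
    cases he : s with
    | nil => exact absurd ((he ▸ hperm).symm.eq_nil) h
    | cons a b => exact ⟨a, b, rfl⟩
  have hsorted : s.Pairwise (· ≤ ·) := by
    simpa using PySem.List.sorted_pairwise N (fun x : Int => x)
  rw [hst]
  have hget : PySem.List.pyGet? (h0 :: t) (0 : Int) = some h0 := by
    simp [PySem.List.pyGet?, PySem.List.pyIdx?]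
  rw [hget]
  -- first step of the fold
  have hfirst : bstep ((none : Option Int), (0:Int), (0:Int), h0) h0 = (some h0, 1, 1, h0) := by
    simp [bstep]
  have hinv1 : BInv [h0] (bstep ((none : Option Int), (0:Int), (0:Int), h0) h0) := by
    rw [hfirst]
    exact ⟨h0, rfl, by simp, by simp, by simp, by simp, by simp, by simp, by simp⟩
  have hsort1 : ([h0] ++ t).Pairwise (· ≤ ·) := by
    rw [hst] at hsorted; simpa using hsorted
  have hinv := bfold_inv t [h0] _ hsort1 hinv1
  rw [List.singleton_append] at hinv
  obtain ⟨l, _, _, _, _, hbv, _, hmax, htie⟩ := hinv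
  have hbest : IsBest (h0 :: t) ((List.foldl bstep (bstep (none, 0, 0, h0) h0) t).2.2.2) := by
    refine ⟨hbv, ?_, ?_⟩
    · intro y hy
      have := hmax y hy
      omega
    · intro y hy he
      exact htie y hy (by omega)
  have hpc : (h0 :: t).Perm N := by rw [← hst]; exact hperm
  have := isBest_of_perm hpc hbest
  simpa [List.foldl_cons] using this

-- A's port returns the IsBest element
theorem solve_isBest {N : List Int} (h : N ≠ []) : IsBest N (solve N) := by
  unfold solve
  simp only []
  have hkeys : (PySem.Dict.counter N).keys = PySem.Set.ofList N := PySem.Dict.keys_counter N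
  have hitems : (PySem.Dict.counter N).items
      = (PySem.Set.ofList N).map (fun k => (k, (N.count k : Int))) := PySem.Dict.items_counter N
  obtain ⟨n, t, rfl⟩ : ∃ n t, N = n :: t := by
    cases N with
    | nil => exact absurd rfl h
    | cons n t => exact ⟨n, t, rfl⟩
  set N := n :: t with hN
  have hnS : n ∈ PySem.Set.ofList N := by
    rw [PySem.Set.mem_ofList]; exact List.mem_cons_self
  have hvals : (PySem.Dict.counter N).values
      = (PySem.Set.ofList N).map (fun k => (N.count k : Int)) := by
    show (PySem.Dict.counter N).items.map (·.2) = _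
    rw [hitems, List.map_map]; rfl
  cases hb : PySem.List.max? (PySem.Dict.counter N).values (fun v => v) with
  | none =>
      exfalso
      have := (PySem.List.max?_eq_none_iff _ _).mp hb
      rw [hvals] at this
      rw [List.map_eq_nil_iff] at this
      rw [this] at hnS; simp at hnS
  | some b =>
      have hbmem := PySem.List.max?_mem hb
      have hbmax := PySem.List.max?_isMax hb
      rw [hvals] at hbmem
      obtain ⟨k0, hk0S, hk0b⟩ := List.mem_map.mp hbmem
      have hble : ∀ y ∈ PySem.Set.ofList N, (N.count y : Int) ≤ b := by
        intro y hy
        have : (N.count y : Int) ∈ (PySem.Dict.counter N).values := by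
          rw [hvals]; exact List.mem_map.mpr ⟨y, hy, rfl⟩
        exact hbmax _ this
      have hc : (PySem.Dict.counter N).keys.foldl
          (fun c i => if (PySem.Dict.counter N).getD i 0 = b then c ++ [i] else c) ([] : List Int)
          = (PySem.Dict.counter N).keys.filter
              (fun i => decide ((PySem.Dict.counter N).getD i 0 = b)) := by
        simpa using PySem.List.foldl_append_ite_eq_filter
          (fun i => (PySem.Dict.counter N).getD i 0 = b) (l := (PySem.Dict.counter N).keys)
          (acc := ([] : List Int))
      have hmemc : ∀ y, y ∈ (PySem.Dict.counter N).keys.filter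
              (fun i => decide ((PySem.Dict.counter N).getD i 0 = b))
          ↔ y ∈ PySem.Set.ofList N ∧ (N.count y : Int) = b := by
        intro y
        rw [List.mem_filter, hkeys]
        constructor
        · rintro ⟨h1, h2⟩
          refine ⟨h1, ?_⟩
          have := of_decide_eq_true h2
          rwa [PySem.Dict.getD_counter] at this
        · rintro ⟨h1, h2⟩
          refine ⟨h1, decide_eq_true ?_⟩
          rwa [PySem.Dict.getD_counter]
      simp only [hc]
      cases hm : PySem.List.max? ((PySem.Dict.counter N).keys.filter
          (fun i => decide ((PySem.Dict.counter N).getD i 0 = b))) (fun v => v) with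
      | none =>
          exfalso
          have := (PySem.List.max?_eq_none_iff _ _).mp hm
          have hk0c := (hmemc k0).mpr ⟨hk0S, hk0b⟩
          rw [this] at hk0c; simp at hk0c
      | some mA =>
          dsimp only
          have hmAmem := PySem.List.max?_mem hm
          have hmAmax := PySem.List.max?_isMax hm
          obtain ⟨hmAS, hmAb⟩ := (hmemc mA).mp hmAmem
          refine ⟨(PySem.Set.mem_ofList _ _).mp hmAS, ?_, ?_⟩
          · intro y hy
            have h1 := hble y ((PySem.Set.mem_ofList _ _).mpr hy)
            omega
          · intro y hy he
            have hyS : y ∈ PySem.Set.ofList N := (PySem.Set.mem_ofList _ _).mpr hy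
            have hyb : (N.count y : Int) = b := by omega
            exact hmAmax y ((hmemc y).mpr ⟨hyS, hyb⟩)

-- ===== VERDICT =====
theorem solve_spec : Claim_equal_solve := by
  unfold Claim_equal_solve
  intro N _ hne
  unfold Spec_solve
  exact isBest_unique (solve_isBest hne) (solve_alt_isBest hne)
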